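-- pv_equiv track=rewrite | github.com/Viviviiii/jasp-multimodal-rag | src/ingestion/pdf_text_loader.py | merge_uppercase_titles
-- ===== SOURCE A (Python) =====
-- def merge_uppercase_titles(lines):
--     """Merge consecutive ALL-CAPS lines into one composite title joined by ':'."""
--     merged, buffer = [], []
--     for line in lines:
--         if line.isupper() and len(line.split()) > 1:
--             buffer.append(line)
--         else:
--             if buffer:
--                 merged.append(": ".join(buffer))
--                 buffer = []
--             merged.append(line)
--     if buffer:
--         merged.append(": ".join(buffer))
--     return merged
-- ===== SOURCE B (Python) =====
-- def merge_uppercase_titles(lines):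
--     """Run-scanning re-implementation: find each maximal run of title lines
--     with an inner scan and join it in one step (no buffer/flush state)."""
--     def is_title(line):
--         return line.isupper() and len(line.split()) > 1
--
--     out = []
--     i, n = 0, len(lines)
--     while i < n:
--         if is_title(lines[i]):
--             j = i + 1
--             while j < n and is_title(lines[j]):
--                 j += 1
--             out.append(": ".join(lines[i:j]))
--             i = j
--         else:
--             out.append(lines[i])
--             i += 1
--     return out
-- ===== Notes on version B (the rewrite author's own statement) =====
-- stated objective: alternative
-- what changed: Replaces A's buffer-accumulate-and-flush loop (with a trailing flush after the loop) by a two-pointer run scanner: each maximal run of title lines is located by an inner scan and joined in one step, so no mutable buffer or post-loop flush exists.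
import Mathlib
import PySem

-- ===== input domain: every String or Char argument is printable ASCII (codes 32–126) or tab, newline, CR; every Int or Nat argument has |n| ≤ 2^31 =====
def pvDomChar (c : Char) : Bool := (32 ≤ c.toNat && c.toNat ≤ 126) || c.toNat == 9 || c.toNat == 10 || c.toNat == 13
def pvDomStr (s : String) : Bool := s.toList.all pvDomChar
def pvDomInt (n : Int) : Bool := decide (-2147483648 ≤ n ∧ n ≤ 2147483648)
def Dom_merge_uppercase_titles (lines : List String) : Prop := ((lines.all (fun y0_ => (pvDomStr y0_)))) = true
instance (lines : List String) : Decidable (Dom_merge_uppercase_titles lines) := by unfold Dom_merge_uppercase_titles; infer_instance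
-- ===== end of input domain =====

-- B replaces A's buffer-accumulate-and-flush loop by a two-pointer run scanner (alternative decomposition, same cost).

-- Hand port of `line.isupper() and len(line.split()) > 1` (shared text of both Pythons).
-- str.isupper(): at least one cased character and no lowercase one — exact on the ASCII domain,
-- where the cased characters are exactly the letters.
def pyIsTitle (line : String) : Bool :=
  (line.toList.any (fun c => PySem.Chars.isupper c || PySem.Chars.islower c)
    && line.toList.all (fun c => !PySem.Chars.islower c))
  && decide ((PySem.Str.split₀ line).length > 1)

-- ===== PORT A =====
-- foldl over the state (merged, buffer), then the trailing flush — A's loop verbatim.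
def merge_uppercase_titles (lines : List String) : List String :=
  let st := lines.foldl
    (fun (s : List String × List String) line =>
      if pyIsTitle line then (s.1, s.2 ++ [line])
      else if s.2.isEmpty then (s.1 ++ [line], s.2)
      else (s.1 ++ [PySem.Str.join ": " s.2, line], []))
    ([], [])
  if st.2.isEmpty then st.1 else st.1 ++ [PySem.Str.join ": " st.2]

-- ===== PORT B =====
-- Source B's two-pointer scan: the inner `while` that advances j over the run is the takeWhile,
-- and `i = j` is the dropWhile; each run is joined in one step.
def merge_uppercase_titles_alt (lines : List String) : List String :=
  match lines with
  | [] => []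
  | l :: rest =>
    if pyIsTitle l then
      PySem.Str.join ": " (l :: rest.takeWhile pyIsTitle)
        :: merge_uppercase_titles_alt (rest.dropWhile pyIsTitle)
    else
      l :: merge_uppercase_titles_alt rest
termination_by lines.length
decreasing_by
  · simpa using Nat.lt_succ_of_le (List.length_dropWhile_le ..)
  · simp

-- ===== PRECONDITION & SPEC =====
def Spec_merge_uppercase_titles (lines : List String) (out : List String) : Prop := out = merge_uppercase_titles_alt lines
instance (lines : List String) (out : List String) : Decidable (Spec_merge_uppercase_titles lines out) := by unfold Spec_merge_uppercase_titles; infer_instance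

-- ===== CLAIM (what is proved, stated in full; the proofs are below) =====
def Claim_equal_merge_uppercase_titles : Prop := ∀ (lines : List String), Dom_merge_uppercase_titles lines → Spec_merge_uppercase_titles lines (merge_uppercase_titles lines)

-- ===== LEMMAS AND PROOFS =====

-- Characterisation of A's remaining work given the pending buffer.
def pvH (buffer lines : List String) : List String :=
  match lines with
  | [] => if buffer.isEmpty then [] else [PySem.Str.join ": " buffer]
  | l :: rest =>
    if pyIsTitle l then pvH (buffer ++ [l]) rest
    else (if buffer.isEmpty then [] else [PySem.Str.join ": " buffer]) ++ l :: pvH [] rest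

lemma pvH_foldl (lines : List String) : ∀ (m b : List String),
    (let st := lines.foldl
      (fun (s : List String × List String) line =>
        if pyIsTitle line then (s.1, s.2 ++ [line])
        else if s.2.isEmpty then (s.1 ++ [line], s.2)
        else (s.1 ++ [PySem.Str.join ": " s.2, line], []))
      (m, b)
    if st.2.isEmpty then st.1 else st.1 ++ [PySem.Str.join ": " st.2])
    = m ++ pvH b lines := by
  induction lines with
  | nil => intro m b; by_cases hb : b.isEmpty <;> simp [pvH, hb]
  | cons l ls ih =>
    intro m b
    by_cases hp : pyIsTitle l
    · simpa [pvH, hp] using ih m (b ++ [l])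
    · by_cases hb : b = []
      · subst hb
        simpa [pvH, hp] using ih (m ++ [l]) []
      · simpa [pvH, hp, hb, List.isEmpty_iff] using ih (m ++ [PySem.Str.join ": " b, l]) []

lemma pvH_alt : ∀ (n : ℕ) (lines : List String), lines.length ≤ n →
    (pvH [] lines = merge_uppercase_titles_alt lines) ∧
    (∀ buffer, ¬ buffer.isEmpty →
      pvH buffer lines
        = PySem.Str.join ": " (buffer ++ lines.takeWhile pyIsTitle)
            :: merge_uppercase_titles_alt (lines.dropWhile pyIsTitle)) := by
  intro n
  induction n with
  | zero =>
    intro lines h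
    have : lines = [] := List.eq_nil_of_length_eq_zero (Nat.le_zero.mp h)
    subst this
    refine ⟨by simp [pvH, merge_uppercase_titles_alt], ?_⟩
    intro buffer hb
    simp [pvH, hb, merge_uppercase_titles_alt]
  | succ n ih =>
    intro lines h
    cases lines with
    | nil =>
      refine ⟨by simp [pvH, merge_uppercase_titles_alt], ?_⟩
      intro buffer hb; simp [pvH, hb, merge_uppercase_titles_alt]
    | cons l rest =>
      have hr : rest.length ≤ n := Nat.lt_succ_iff.mp (by simpa using h)
      constructor
      · by_cases hp : pyIsTitle l
        · have h2 := (ih rest hr).2 [l] (by simp)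
          rw [merge_uppercase_titles_alt]
          simp only [pvH, hp, if_pos, List.isEmpty_nil]
          simpa using h2
        · have h1 := (ih rest hr).1
          rw [merge_uppercase_titles_alt]
          simp [pvH, hp, h1]
      · intro buffer hb
        by_cases hp : pyIsTitle l
        · have h2 := (ih rest hr).2 (buffer ++ [l]) (by simp [List.isEmpty_iff])
          simp only [pvH, hp, if_pos] at h2 ⊢
          rw [h2]
          simp [hp, List.append_assoc]
        · have h1 := (ih rest hr).1
          rw [merge_uppercase_titles_alt.eq_def]
          simp [pvH, hp, hb, h1]

-- ===== VERDICT (by name: the statement is the Claim_ definition above) =====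
theorem merge_uppercase_titles_spec : Claim_equal_merge_uppercase_titles := by
  intro lines _
  unfold Spec_merge_uppercase_titles merge_uppercase_titles
  have := pvH_foldl lines [] []
  simp only at this
  rw [this]
  simpa using (pvH_alt lines.length lines le_rfl).1
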